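-- pv_equiv track=rewrite | github.com/hiteshpindikanti/Coding_Questions | dhruv1.py | longest_k_interspace_substring
-- ===== SOURCE A (Python) =====
-- def longest_k_interspace_substring(word: str, k: int) -> str:
--     if len(word) == 1:
--         return word
--     start = 0
--     end = 1
--     substring_index = (0, 0)
--     while start < end < len(word):
--         while end<len(word) and abs(ord(word[end-1]) - ord(word[end])) <= k:
--             end += 1
--         if end-start > (substring_index[1]-substring_index[0]):
--             substring_index = (start, end)
--         start = end
--         end += 1
--     return word[substring_index[0]: substring_index[1]]
-- ===== SOURCE B (Python) =====
-- def longest_k_interspace_substring(word: str, k: int) -> str: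
--     n = len(word)
--     breaks = [i for i in range(1, n) if abs(ord(word[i - 1]) - ord(word[i])) > k]
--     boundaries = [0] + breaks + [n]
--     best_s, best_e = 0, 0
--     for s, e in zip(boundaries, boundaries[1:]):
--         if e - s > best_e - best_s:
--             best_s, best_e = s, e
--     return word[best_s:best_e]
-- ===== Notes on version B (the rewrite author's own statement) =====
-- stated objective: alternative
-- what changed: Replaced A's nested while-loops with running start/end indices by a segment decomposition: compute the list of break indices once, form the boundary list, and scan consecutive boundary pairs for the first longest segment.
import Mathlib
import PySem

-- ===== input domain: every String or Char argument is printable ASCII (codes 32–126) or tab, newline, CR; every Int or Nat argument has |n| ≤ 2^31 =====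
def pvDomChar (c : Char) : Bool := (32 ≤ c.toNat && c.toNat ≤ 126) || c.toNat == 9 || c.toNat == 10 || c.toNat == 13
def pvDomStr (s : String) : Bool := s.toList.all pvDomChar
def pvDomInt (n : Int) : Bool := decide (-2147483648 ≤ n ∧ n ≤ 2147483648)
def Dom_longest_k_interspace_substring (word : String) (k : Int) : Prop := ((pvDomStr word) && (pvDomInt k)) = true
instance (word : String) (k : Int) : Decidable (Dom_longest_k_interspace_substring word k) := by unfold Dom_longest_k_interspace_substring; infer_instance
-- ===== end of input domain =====

-- B replaces A's nested while-loops by a break-index/segment decomposition of the word (alternative decomposition, same cost).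

-- ===== PORT A =====
-- ord(c) as an Int
def pvOrd (c : Char) : Int := (c.toNat : Int)

-- inner while loop of A: "while end < len(word) and abs(ord(word[end-1]) - ord(word[end])) <= k: end += 1"
def pvInnerA (cs : List Char) (k : Int) (e : Nat) : Nat :=
  if h : e < cs.length ∧ |pvOrd (cs.getD (e - 1) ' ') - pvOrd (cs.getD e ' ')| ≤ k then
    pvInnerA cs k (e + 1)
  else e
termination_by cs.length - e
decreasing_by omega

-- termination helper for the outer loop (cited by pvOuterA's decreasing_by)
theorem pvInnerA_ge (cs : List Char) (k : Int) (e : Nat) : e ≤ pvInnerA cs k e := by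
  fun_induction pvInnerA cs k e with
  | case1 e h ih => omega
  | case2 e h => omega

-- outer while loop of A (start, end, substring_index as state)
def pvOuterA (cs : List Char) (k : Int) (s e : Nat) (best : Nat × Nat) : Nat × Nat :=
  if h : s < e ∧ e < cs.length then
    let e' := pvInnerA cs k e
    let best' := if best.2 - best.1 < e' - s then (s, e') else best
    pvOuterA cs k e' (e' + 1) best'
  else best
termination_by cs.length - e
decreasing_by
  have := pvInnerA_ge cs k e
  omega

def longest_k_interspace_substring (word : String) (k : Int) : String :=
  if word.toList.length == 1 then word
  else
    let best := pvOuterA word.toList k 0 1 (0, 0)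
    PySem.Str.slice word (some (best.1 : Int)) (some (best.2 : Int))

-- ===== PORT B =====
def longest_k_interspace_substring_alt (word : String) (k : Int) : String :=
  let cs := word.toList
  let n := cs.length
  -- breaks = [i for i in range(1, n) if abs(ord(word[i-1]) - ord(word[i])) > k]
  let breaks := (List.range' 1 (n - 1)).filter
    (fun i => decide (k < |pvOrd (cs.getD (i - 1) ' ') - pvOrd (cs.getD i ' ')|))
  let boundaries := 0 :: breaks ++ [n]
  -- for s, e in zip(boundaries, boundaries[1:]): keep first longest segment (strict >)
  let best := (boundaries.zip boundaries.tail).foldl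
    (fun best p => if best.2 - best.1 < p.2 - p.1 then p else best) (0, 0)
  PySem.Str.slice word (some (best.1 : Int)) (some (best.2 : Int))

-- ===== PRECONDITION & SPEC =====
def Spec_longest_k_interspace_substring (word : String) (k : Int) (out : String) : Prop := out = longest_k_interspace_substring_alt word k
instance (word : String) (k : Int) (out : String) : Decidable (Spec_longest_k_interspace_substring word k out) := by unfold Spec_longest_k_interspace_substring; infer_instance

-- ===== CLAIM (what is proved, stated in full; the proofs are below) =====
def Claim_equal_longest_k_interspace_substring : Prop := ∀ (word : String) (k : Int), Dom_longest_k_interspace_substring word k → Spec_longest_k_interspace_substring word k (longest_k_interspace_substring word k)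

-- ===== LEMMAS AND PROOFS =====

def pvBrk (cs : List Char) (k : Int) (i : Nat) : Bool :=
  decide (k < |pvOrd (cs.getD (i - 1) ' ') - pvOrd (cs.getD i ' ')|)

def pvBreaks (cs : List Char) (k : Int) : List Nat :=
  (List.range' 1 (cs.length - 1)).filter (pvBrk cs k)

def pvStep (best p : Nat × Nat) : Nat × Nat :=
  if best.2 - best.1 < p.2 - p.1 then p else best

def pvFold (best : Nat × Nat) (l : List Nat) : Nat × Nat :=
  (l.zip l.tail).foldl pvStep best

theorem mem_pvBreaks (cs : List Char) (k : Int) (i : Nat) :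
    i ∈ pvBreaks cs k ↔ (1 ≤ i ∧ i < 1 + (cs.length - 1)) ∧ pvBrk cs k i = true := by
  simp only [pvBreaks, List.mem_filter, List.mem_range']
  constructor
  · rintro ⟨⟨j, hj, rfl⟩, hb⟩; exact ⟨⟨by omega, by omega⟩, hb⟩
  · rintro ⟨⟨h1, h2⟩, hb⟩; exact ⟨⟨i - 1, by omega, by omega⟩, hb⟩

theorem pairwise_pvBreaks (cs : List Char) (k : Int) :
    (pvBreaks cs k).Pairwise (· < ·) := by
  exact (List.pairwise_lt_range' ..).filter _

theorem filter_tail_sorted (l : List Nat) (hl : l.Pairwise (· < ·)) :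
    ∀ s b t, l.filter (fun i => decide (s < i)) = b :: t →
      t = l.filter (fun i => decide (b < i)) := by
  induction l with
  | nil => intro s b t h; simp [List.filter] at h
  | cons a r ih =>
    intro s b t h
    rcases List.pairwise_cons.mp hl with ⟨ha, hr⟩
    by_cases hsa : s < a
    · rw [List.filter_cons_of_pos (by simpa using hsa)] at h
      injection h with h1 h2
      subst h1
      rw [List.filter_cons_of_neg (by simp)]
      rw [← h2]
      rw [List.filter_eq_self.mpr (fun x hx => by simpa using hsa.trans (ha x hx)),
          List.filter_eq_self.mpr (fun x hx => by simpa using ha x hx)]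
    · rw [List.filter_cons_of_neg (by simpa using hsa)] at h
      have hb : b ∈ r := by
        have : b ∈ r.filter (fun i => decide (s < i)) := h ▸ List.mem_cons_self
        exact List.mem_of_mem_filter this
      have hab : a < b := ha b hb
      rw [List.filter_cons_of_neg (by simp; omega)]
      exact ih hr s b t h

theorem headD_filter_mem (l : List Nat) (hl : l.Pairwise (· < ·)) (s d : Nat)
    (hb : s + 1 ∈ l) : (l.filter (fun i => decide (s < i))).headD d = s + 1 := by
  induction l with
  | nil => simp at hb
  | cons a r ih =>
    rcases List.pairwise_cons.mp hl with ⟨ha, hr⟩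
    rcases List.mem_cons.mp hb with h | h
    · subst h; rw [List.filter_cons_of_pos (by simp)]; rfl
    · have : a < s + 1 := ha _ h
      rw [List.filter_cons_of_neg (by simp; omega)]
      exact ih hr h

theorem pvInnerA_char (cs : List Char) (k : Int) :
    ∀ m s, cs.length - s ≤ m → s + 1 ≤ cs.length →
      pvInnerA cs k (s + 1) =
        ((pvBreaks cs k).filter (fun i => decide (s < i))).headD cs.length := by
  intro m
  induction m with
  | zero => intro s h1 h2; omega
  | succ m ih =>
    intro s h1 h2
    by_cases hn : s + 1 < cs.length
    · by_cases hbrk : k < |pvOrd (cs.getD (s + 1 - 1) ' ') - pvOrd (cs.getD (s + 1) ' ')|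
      · -- break at s+1: inner stops immediately; s+1 is the first break > s
        rw [pvInnerA]
        rw [dif_neg (fun hc => absurd hbrk (by omega))]
        have hmem : s + 1 ∈ pvBreaks cs k :=
          (mem_pvBreaks cs k (s + 1)).mpr ⟨⟨by omega, by omega⟩, decide_eq_true hbrk⟩
        exact (headD_filter_mem _ (pairwise_pvBreaks cs k) s _ hmem).symm
      · -- no break at s+1: advance
        rw [pvInnerA]
        rw [dif_pos ⟨hn, by omega⟩]
        rw [ih (s + 1) (by omega) (by omega)]
        congr 1
        apply List.filter_congr
        intro x hx
        have hxb := (mem_pvBreaks cs k x).mp hx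
        have hne : x ≠ s + 1 := by
          intro hcontr
          subst hcontr
          exact hbrk (of_decide_eq_true hxb.2)
        simp only [decide_eq_decide]
        omega
    · -- s + 1 = length: loop does not run; no break ≥ s+1 exists
      have hse : s + 1 = cs.length := by omega
      rw [pvInnerA, dif_neg (by omega)]
      have : (pvBreaks cs k).filter (fun i => decide (s < i)) = [] := by
        apply List.filter_eq_nil_iff.mpr
        intro x hx
        have := (mem_pvBreaks cs k x).mp hx
        simp only [decide_eq_true_iff]
        omega
      rw [this]; simp [hse]

theorem pvFold_cons_cons (best : Nat × Nat) (a b : Nat) (l : List Nat) :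
    pvFold best (a :: b :: l) = pvFold (pvStep best (a, b)) (b :: l) := by
  simp [pvFold, List.zip]

theorem pvOuterA_char (cs : List Char) (k : Int) :
    ∀ m s (best : Nat × Nat), cs.length - s ≤ m → s < cs.length →
      (s + 1 < cs.length ∨ 1 ≤ best.2 - best.1) →
      pvOuterA cs k s (s + 1) best =
        pvFold best (s :: (pvBreaks cs k).filter (fun i => decide (s < i)) ++ [cs.length]) := by
  intro m
  induction m with
  | zero => intro s best h1 h2; omega
  | succ m ih =>
    intro s best h1 h2 h3
    rcases hF : (pvBreaks cs k).filter (fun i => decide (s < i)) with _ | ⟨b, t⟩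
    · -- no break after s: single final segment (s, n)
      have hinner : pvInnerA cs k (s + 1) = cs.length := by
        rw [pvInnerA_char cs k (cs.length - s) s (by omega) (by omega), hF]; rfl
      by_cases hn : s + 1 < cs.length
      · rw [pvOuterA, dif_pos ⟨by omega, hn⟩]
        simp only [hinner]
        rw [pvOuterA, dif_neg (by omega)]
        simp [pvFold, List.zip, pvStep]
      · -- s + 1 = length: A's loop exits; the length-1 segment cannot beat best (len ≥ 1)
        have hlen : 1 ≤ best.2 - best.1 := by omega
        rw [pvOuterA, dif_neg (by omega)]
        have hse : s + 1 = cs.length := by omega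
        simp only [List.cons_append, List.nil_append]
        rw [pvFold]
        simp only [List.tail_cons, List.zip]
        simp [pvStep, List.zipWith]
        omega
    · -- next break b: segment (s, b), then continue from b
      have hb := (mem_pvBreaks cs k b).mp (List.mem_of_mem_filter (hF ▸ List.mem_cons_self))
      have hsb : s < b := by
        have : b ∈ (pvBreaks cs k).filter (fun i => decide (s < i)) := hF ▸ List.mem_cons_self
        simpa using (List.of_mem_filter this)
      have hbn : b < cs.length := by omega
      have hinner : pvInnerA cs k (s + 1) = b := by
        rw [pvInnerA_char cs k (cs.length - s) s (by omega) (by omega), hF]; rfl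
      have ht : t = (pvBreaks cs k).filter (fun i => decide (b < i)) :=
        filter_tail_sorted _ (pairwise_pvBreaks cs k) s b t hF
      rw [pvOuterA, dif_pos ⟨by omega, by omega⟩]
      simp only [hinner]
      have hstep : (if best.2 - best.1 < b - s then (s, b) else best) = pvStep best (s, b) := rfl
      rw [hstep]
      rw [ih b (pvStep best (s, b)) (by omega) hbn
        (Or.inr (by unfold pvStep; split <;> omega))]
      simp only [List.cons_append]
      rw [pvFold_cons_cons, ← ht]

theorem slice_self_of_len_one (word : String) (h : word.toList.length = 1) :
    PySem.Str.slice word (some ((0 : Nat) : Int)) (some ((1 : Nat) : Int)) = word := by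
  have : PySem.List.slice word.toList (some ((0 : Nat) : Int)) (some ((1 : Nat) : Int)) = word.toList := by
    rw [PySem.List.slice_natCast]
    simp [List.take_of_length_le, h]
  apply String.toList_injective
  rw [PySem.Str.toList_slice, PySem.Chars.slice_eq_listSlice, this]

-- ===== VERDICT (by name: the statement is the Claim_ definition above) =====
theorem longest_k_interspace_substring_spec : Claim_equal_longest_k_interspace_substring := by
  intro word k _
  unfold Spec_longest_k_interspace_substring
  unfold longest_k_interspace_substring longest_k_interspace_substring_alt
  set cs := word.toList with hcs
  rcases hn : cs.length with _ | _ | n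
  · -- empty word
    simp only [hn]
    rw [pvOuterA, dif_neg (by omega)]
    have : (List.range' 1 (cs.length - 1)).filter
        (fun i => decide (k < |pvOrd (cs.getD (i - 1) ' ') - pvOrd (cs.getD i ' ')|)) = [] := by
      simp [hn]
    simp [hn, List.zip]
  · -- length 1: A returns word, B slices word[0:1] = word
    simp only [hn]
    norm_num
    exact (slice_self_of_len_one word (by omega)).symm
  · -- length ≥ 2
    have h2 : 2 ≤ cs.length := by omega
    simp only [hn]
    have hbeq : ((n + 1 + 1 : Nat) == 1) = false := by simp
    rw [hbeq]
    simp only [Bool.false_eq_true, if_false]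
    have hA := pvOuterA_char cs k cs.length 0 (0, 0) (by omega) (by omega) (Or.inl (by omega))
    have hfilter : (pvBreaks cs k).filter (fun i => decide (0 < i)) = pvBreaks cs k := by
      apply List.filter_eq_self.mpr
      intro x hx
      have := (mem_pvBreaks cs k x).mp hx
      simp only [decide_eq_true_iff]; omega
    rw [show (1 : Nat) = 0 + 1 from rfl] at hA
    rw [hA, hfilter]
    have : ((List.range' 1 (cs.length - 1)).filter
        (fun i => decide (k < |pvOrd (cs.getD (i - 1) ' ') - pvOrd (cs.getD i ' ')|))) = pvBreaks cs k := rfl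
    rw [hn] at this ⊢
    rw [this]
    rfl
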